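/- GENERATED by farm/mkstatement.py from design/units.tsv (unit `pow_int`) and the Specs of Vorbis/Spec/*.lean — do not edit.
   THE STATEMENT of the proof unit `pow_int`: the function `pow_int` (12 instructions) satisfies its contract,
   given the contracts of its callees. What the names mean: Vorbis/Spec/Basic.lean. The theorem to prove:
   `theorem pow_int_ok : Vorbis.Spec.pow_int.Statement`. -/
import Vorbis.Spec.Libm
namespace Vorbis.Spec.pow_int
open X86 X86.User Asan

/-- The statement of unit `pow_int`. -/
def Statement : Prop :=
  ∀ (Lay : Layout) (_hLay : Lay.hi = 0x1000000) (μ : Microarch) (_hμ : UserX.MicroOK μ) (u₀ : State)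
    (_hcode : HasCodeNat Lay u₀ Vorbis.L.pow_int.entry Vorbis.Code.code_pow_int.nat Vorbis.L.pow_int.size),
    ∀ (others : List Obj) (frames : List (Nat × FrameLayout)), Calls Lay μ Vorbis.WayInv (Vorbis.conv u₀) Vorbis.L.pow_int.entry (Vorbis.Spec.pow_int.spec others frames)

end Vorbis.Spec.pow_int
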